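-- pv_equiv track=rewrite | github.com/ksablauskas/denovocnn | denovonet/infer.py | remove_matching_string
-- ===== SOURCE A (Python) =====
-- from difflib import SequenceMatcher
--
-- def remove_matching_string(start, ref, var):
--     match = SequenceMatcher(None, ref, var, autojunk=False).find_longest_match(0, len(ref), 0, len(var))
--
--     insertion = False
--     if len(ref) > len(var):
--         insertion = True
--
--     new_ref = ref.replace(ref[match.a: match.a + match.size], '', 1)
--     new_var = var.replace(var[match.b:  match.b + match.size], '', 1)
--
--     if insertion:
--         start += match.size
--
--     if match.size == 0:
--         return start, new_ref, new_var
--     else: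
--         return remove_matching_string(start, new_ref, new_var)
-- ===== SOURCE B (Python) =====
-- def remove_matching_string(start, ref, var):
--     while True:
--         la, lb = len(ref), len(var)
--         # longest common substring via a dense DP row (earliest start in ref, then in var)
--         best_i = best_j = best_k = 0
--         prev = [0] * lb
--         for i in range(la):
--             cur = [0] * lb
--             for j in range(lb):
--                 if ref[i] == var[j]:
--                     k = (prev[j - 1] if j > 0 else 0) + 1
--                     cur[j] = k
--                     if k > best_k:
--                         best_i, best_j, best_k = i - k + 1, j - k + 1, k
--             prev = cur
--         if la > lb:
--             start += best_k
--         new_ref = ref.replace(ref[best_i:best_i + best_k], '', 1)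
--         new_var = var.replace(var[best_j:best_j + best_k], '', 1)
--         if best_k == 0:
--             return start, new_ref, new_var
--         ref, var = new_ref, new_var
-- ===== Notes on version B (the rewrite author's own statement) =====
-- stated objective: alternative
-- what changed: Replaces difflib's SequenceMatcher machinery (char-to-positions dict, sparse per-row hash DP with continue/break, and post-hoc match-extension while loops) and the tail recursion by a plain while-loop that finds the longest common substring with a dense DP row scanned over all positions of var; the same match (size and earliest-in-ref-then-in-var tie-breaking) is proved to come out.
import Mathlib
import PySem

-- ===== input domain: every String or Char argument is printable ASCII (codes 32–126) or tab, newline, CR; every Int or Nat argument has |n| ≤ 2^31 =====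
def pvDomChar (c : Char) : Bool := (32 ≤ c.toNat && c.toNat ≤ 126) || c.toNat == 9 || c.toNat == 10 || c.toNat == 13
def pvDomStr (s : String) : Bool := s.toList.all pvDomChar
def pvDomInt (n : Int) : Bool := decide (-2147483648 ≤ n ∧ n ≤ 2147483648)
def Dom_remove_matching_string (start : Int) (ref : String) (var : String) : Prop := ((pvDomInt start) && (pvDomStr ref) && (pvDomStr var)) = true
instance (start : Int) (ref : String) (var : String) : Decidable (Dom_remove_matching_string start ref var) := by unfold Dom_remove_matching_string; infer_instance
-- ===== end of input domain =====

-- B iterates instead of recursing and computes the longest common substring with a dense DP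
-- row over all of var, instead of difflib's char→positions dict + sparse hash-row DP; same values proved.

-- ===== PORT A =====

-- shared stdlib port: s.replace(old, '', 1) — removes the FIRST occurrence of old (exact:
-- Python's replace with count 1 and empty replacement; old = '' replaces the empty string
-- at position 0 with '', i.e. returns s unchanged)
def pvRemoveFirstSub (old : List Char) : List Char → List Char
  | [] => []
  | c :: rest => if old.isPrefixOf (c :: rest) then (c :: rest).drop old.length
                 else c :: pvRemoveFirstSub old rest

def pvReplace1 (s old : List Char) : List Char :=
  if old = [] then s else pvRemoveFirstSub old s

-- difflib __chain_b with isjunk = None, autojunk = False: b2j[elt] = ascending positions of elt in b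
-- (junk/popular pruning is skipped exactly as CPython skips it for this configuration)
def pvB2j (b : List Char) : PySem.Dict Char (List Int) :=
  (PySem.List.enumerate b 0).foldl (fun d p => d.modify p.2 [] (· ++ [p.1])) PySem.Dict.empty

-- inner 'for j in b2j.get(a[i], nothing)' loop of find_longest_match, with the literal
-- 'if j < blo: continue' (blo = 0) and 'if j >= bhi: break' (bhi = len(b)) tests
def pvInnerA (i : Int) (lb : Nat) (j2len : PySem.Dict Int Int) :
    List Int → PySem.Dict Int Int → Int × Int × Int → PySem.Dict Int Int × (Int × Int × Int)
  | [], newj2len, best => (newj2len, best)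
  | j :: js, newj2len, best =>
      if j < 0 then pvInnerA i lb j2len js newj2len best
      else if (lb : Int) ≤ j then (newj2len, best)
      else
        let k := j2len.getD (j - 1) 0 + 1
        let best' := if best.2.2 < k then (i - k + 1, j - k + 1, k) else best
        pvInnerA i lb j2len js (newj2len.insert j k) best'

-- 'while besti > alo and bestj > blo and not isbjunk(b[bestj-1]) and a[besti-1] == b[bestj-1]'
-- (isbjunk is constantly False: the junk set is empty); a[besti-1] via pyGet? (indices are in range)
def pvExtBack (a b : List Char) (besti bestj bestsize : Int) : Int × Int × Int :=
  if h : 0 < besti ∧ 0 < bestj ∧ PySem.List.pyGet? a (besti - 1) = PySem.List.pyGet? b (bestj - 1)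
  then pvExtBack a b (besti - 1) (bestj - 1) (bestsize + 1)
  else (besti, bestj, bestsize)
termination_by besti.toNat
decreasing_by omega

-- 'while besti+bestsize < ahi and bestj+bestsize < bhi and not isbjunk(…) and a[…] == b[…]: bestsize += 1'
-- fuel = len(a) bounds the iteration count (bestsize grows while besti+bestsize < len(a))
def pvExtFwd (a b : List Char) (la lb : Int) : Nat → Int → Int → Int → Int × Int × Int
  | 0, bi, bj, bs => (bi, bj, bs)
  | fuel + 1, bi, bj, bs =>
      if bi + bs < la ∧ bj + bs < lb ∧ PySem.List.pyGet? a (bi + bs) = PySem.List.pyGet? b (bj + bs)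
      then pvExtFwd a b la lb fuel bi bj (bs + 1)
      else (bi, bj, bs)

-- SequenceMatcher(None, ref, var, autojunk=False).find_longest_match(0, len(ref), 0, len(var)).
-- The final two junk-extension while loops of CPython are identity here: their conditions require
-- isbjunk(…) to be True, and the junk set is empty, so they never execute and are not repeated.
def pvFLMA (a b : List Char) : Int × Int × Int :=
  let lb := b.length
  let b2j := pvB2j b
  let res := (PySem.List.enumerate a 0).foldl
    (fun (st : PySem.Dict Int Int × (Int × Int × Int)) p =>
      pvInnerA p.1 lb st.1 (b2j.getD p.2 []) PySem.Dict.empty st.2)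
    (PySem.Dict.empty, (0, 0, 0))
  let best := pvExtBack a b res.2.1 res.2.2.1 res.2.2.2
  pvExtFwd a b a.length b.length a.length best.1 best.2.1 best.2.2

-- the recursive function itself; fuel = len(ref)+len(var)+1 is a totality guard only: every
-- recursive call strips a nonempty common substring from both strings, so fuel is never exhausted
def pvGoA : Nat → Int → String → String → Int × String × String
  | 0, start, ref, var => (start, ref, var)
  | fuel + 1, start, ref, var =>
      let a := ref.toList
      let b := var.toList
      let m := pvFLMA a b
      let newRef := pvReplace1 a (PySem.List.slice a (some m.1) (some (m.1 + m.2.2)))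
      let newVar := pvReplace1 b (PySem.List.slice b (some m.2.1) (some (m.2.1 + m.2.2)))
      let start' := if b.length < a.length then start + m.2.2 else start
      if m.2.2 = 0 then (start', String.ofList newRef, String.ofList newVar)
      else pvGoA fuel start' (String.ofList newRef) (String.ofList newVar)

def remove_matching_string (start : Int) (ref : String) (var : String) : Int × String × String :=
  pvGoA (ref.toList.length + var.toList.length + 1) start ref var

-- ===== PORT B =====

-- one cell of B's dense DP row: cur[j] = prev[j-1]+1 on a character match, best updated on strict improvement
def pvStepB (b : List Char) (prev : List Int) (ai : Char) (i : Nat)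
    (st : List Int × Int × Int × Int) (j : Nat) : List Int × Int × Int × Int :=
  if ai = b.getD j ' ' then
    let k := (if 0 < j then prev.getD (j - 1) 0 else 0) + 1
    let best := if st.2.2.2 < k then ((i : Int) - k + 1, (j : Int) - k + 1, k) else st.2
    (st.1.set j k, best)
  else st

-- longest common substring, earliest start in a then in b, by the dense row DP of Source B
def pvFLMB (a b : List Char) : Int × Int × Int :=
  let lb := b.length
  let res := (List.range a.length).foldl
    (fun (st : List Int × Int × Int × Int) i =>
      (List.range lb).foldl (pvStepB b st.1 (a.getD i ' ') i) (List.replicate lb 0, st.2))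
    (List.replicate lb 0, (0, 0, 0))
  res.2

-- the 'while True' loop of Source B; same totality fuel as A's port (never exhausted)
def pvGoB : Nat → Int → String → String → Int × String × String
  | 0, start, ref, var => (start, ref, var)
  | fuel + 1, start, ref, var =>
      let a := ref.toList
      let b := var.toList
      let m := pvFLMB a b
      let start' := if b.length < a.length then start + m.2.2 else start
      let newRef := pvReplace1 a (PySem.List.slice a (some m.1) (some (m.1 + m.2.2)))
      let newVar := pvReplace1 b (PySem.List.slice b (some m.2.1) (some (m.2.1 + m.2.2)))
      if m.2.2 = 0 then (start', String.ofList newRef, String.ofList newVar)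
      else pvGoB fuel start' (String.ofList newRef) (String.ofList newVar)

def remove_matching_string_alt (start : Int) (ref : String) (var : String) : Int × String × String :=
  pvGoB (ref.toList.length + var.toList.length + 1) start ref var

-- ===== PRECONDITION & SPEC =====
def Spec_remove_matching_string (start : Int) (ref : String) (var : String) (out : Int × String × String) : Prop := out = remove_matching_string_alt start ref var
instance (start : Int) (ref : String) (var : String) (out : Int × String × String) : Decidable (Spec_remove_matching_string start ref var out) := by unfold Spec_remove_matching_string; infer_instance

-- ===== CLAIM (what is proved, stated in full; the proofs are below) =====
def Claim_equal_remove_matching_string : Prop := ∀ (start : Int) (ref : String) (var : String), Dom_remove_matching_string start ref var → Spec_remove_matching_string start ref var (remove_matching_string start ref var)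


-- ===== LEMMAS AND PROOFS =====

-- length of the longest common suffix of a.take i and b.take j
def pvSuf (a b : List Char) : Nat → Nat → Nat
  | 0, _ => 0
  | _ + 1, 0 => 0
  | i + 1, j + 1 => if a.getD i ' ' = b.getD j ' ' then pvSuf a b i j + 1 else 0

def pvK (a b : List Char) (i j : Nat) : Int := (pvSuf a b (i + 1) (j + 1) : Int)

-- one canonical best-update step, on the cell (i, j) (0-based end positions of a match)
def pvBStep (a b : List Char) (best : Int × Int × Int) (c : Nat × Nat) : Int × Int × Int :=
  if best.2.2 < pvK a b c.1 c.2 then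
    ((c.1 : Int) - pvK a b c.1 c.2 + 1, (c.2 : Int) - pvK a b c.1 c.2 + 1, pvK a b c.1 c.2)
  else best

def pvCellsRow (a b : List Char) (i : Nat) : List (Nat × Nat) :=
  ((List.range b.length).filter (fun j => b.getD j ' ' = a.getD i ' ')).map (fun j => (i, j))

def pvCells (a b : List Char) (m : Nat) : List (Nat × Nat) :=
  (List.range m).flatMap (pvCellsRow a b)

def pvCBest (a b : List Char) : Int × Int × Int :=
  (pvCells a b a.length).foldl (pvBStep a b) (0, 0, 0)

theorem pvSuf_zero_right (a b : List Char) (i : Nat) : pvSuf a b i 0 = 0 := by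
  cases i <;> rfl

-- exactness: the characters just before the common suffix differ
theorem pvSuf_exact (a b : List Char) :
    ∀ i j, pvSuf a b i j < i → pvSuf a b i j < j →
      a.getD (i - pvSuf a b i j - 1) ' ' ≠ b.getD (j - pvSuf a b i j - 1) ' ' := by
  intro i
  induction i with
  | zero => intro j h; omega
  | succ n ih =>
      intro j
      cases j with
      | zero => intro _ h; omega
      | succ m =>
          simp only [pvSuf]
          split
          · intro h1 h2
            have := ih m (by omega) (by omega)
            simpa using this
          · intro _ _
            simpa using ‹¬ a.getD n ' ' = b.getD m ' '›



-- row-restricted cell list: matches in row i among columns < m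
def pvRowCells (a b : List Char) (i m : Nat) : List (Nat × Nat) :=
  ((List.range m).filter (fun j => b.getD j ' ' = a.getD i ' ')).map (fun j => (i, j))

theorem pvRowCells_full (a b : List Char) (i : Nat) :
    pvRowCells a b i b.length = pvCellsRow a b i := rfl

theorem pvRowCells_succ (a b : List Char) (i m : Nat) :
    pvRowCells a b i (m + 1) =
      if b.getD m ' ' = a.getD i ' ' then pvRowCells a b i m ++ [(i, m)]
      else pvRowCells a b i m := by
  simp only [pvRowCells, List.range_succ, List.filter_append]
  split <;> simp_all

-- the row invariant carried between rows: prev holds the suffix lengths ending at row i - 1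
def pvPrevOK (a b : List Char) (p : List Int) (i : Nat) : Prop :=
  p.length = b.length ∧ ∀ j < b.length, p.getD j 0 = (pvSuf a b i (j + 1) : Int)

theorem pvStepB_k (a b : List Char) (prev : List Int) (i m : Nat)
    (hp : pvPrevOK a b prev i) (hm : m < b.length) (hc : b.getD m ' ' = a.getD i ' ') :
    (if 0 < m then prev.getD (m - 1) 0 else 0) + 1 = pvK a b i m := by
  rcases hp with ⟨hl, hv⟩
  have hs : pvSuf a b (i + 1) (m + 1) = pvSuf a b i m + 1 := by
    simp only [pvSuf]
    rw [if_pos hc.symm]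
  by_cases h0 : 0 < m
  · have := hv (m - 1) (by omega)
    rw [if_pos h0, this, pvK, hs]
    have hmm : m - 1 + 1 = m := by omega
    rw [hmm]
    push_cast
    ring
  · have hm0 : m = 0 := by omega
    subst hm0
    rw [if_neg h0, pvK, hs, pvSuf_zero_right]
    norm_num

theorem pvRowB_fold (a b : List Char) (prev : List Int) (i : Nat)
    (hp : pvPrevOK a b prev i) :
    ∀ m, m ≤ b.length → ∀ best : Int × Int × Int,
      ((List.range m).foldl (pvStepB b prev (a.getD i ' ') i) (List.replicate b.length 0, best)).1.length = b.length ∧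
      (∀ j < b.length,
        ((List.range m).foldl (pvStepB b prev (a.getD i ' ') i) (List.replicate b.length 0, best)).1.getD j 0 =
          if j < m then (pvSuf a b (i + 1) (j + 1) : Int) else 0) ∧
      ((List.range m).foldl (pvStepB b prev (a.getD i ' ') i) (List.replicate b.length 0, best)).2 =
        (pvRowCells a b i m).foldl (pvBStep a b) best := by
  intro m
  induction m with
  | zero =>
      intro _ best
      refine ⟨by simp, fun j hj => by simp, by simp [pvRowCells]⟩
  | succ n ih =>
      intro hn best
      obtain ⟨ihl, ihv, ihb⟩ := ih (by omega) best
      rw [List.range_succ, List.foldl_append, List.foldl_cons, List.foldl_nil]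
      set st := (List.range n).foldl (pvStepB b prev (a.getD i ' ') i) (List.replicate b.length 0, best) with hst
      rw [pvRowCells_succ]
      by_cases hc : b.getD n ' ' = a.getD i ' '
      · have hk := pvStepB_k a b prev i n hp (by omega) hc
        have hstep : pvStepB b prev (a.getD i ' ') i st n =
            (st.1.set n (pvK a b i n), pvBStep a b st.2 (i, n)) := by
          rw [pvStepB, if_pos hc.symm, hk, pvBStep]
        rw [hstep, if_pos hc]
        refine ⟨by simp [ihl], ?_, by rw [List.foldl_append, ← ihb, List.foldl_cons, List.foldl_nil]⟩
        intro j hj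
        by_cases hjn : j = n
        · subst hjn
          rw [if_pos (Nat.lt_succ_self _)]
          simp [List.getD, ihl, hj, pvK]
        · simp only [List.getD, List.getElem?_set]
          rw [if_neg (by tauto)]
          have := ihv j hj
          simp only [List.getD] at this
          rw [this]
          have hiff : j < n ↔ j < n + 1 := by omega
          simp only [hiff]
      · have hstep : pvStepB b prev (a.getD i ' ') i st n = st := by
          rw [pvStepB, if_neg (fun h => hc h.symm)]
        rw [hstep, if_neg hc]
        refine ⟨ihl, ?_, ihb⟩
        intro j hj
        rw [ihv j hj]
        by_cases hjn : j = n
        · subst hjn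
          rw [if_neg (by omega), if_pos (by omega)]
          have : pvSuf a b (i + 1) (j + 1) = 0 := by
            simp [pvSuf]
            intro h; exact absurd h.symm hc
          simp [this]
        · have hiff : j < n ↔ j < n + 1 := by omega
          simp only [hiff]

theorem pvCells_succ (a b : List Char) (m : Nat) :
    pvCells a b (m + 1) = pvCells a b m ++ pvCellsRow a b m := by
  simp [pvCells, List.range_succ]

theorem pvFLMB_eq_cbest (a b : List Char) : pvFLMB a b = pvCBest a b := by
  have main : ∀ m : Nat,
      pvPrevOK a b ((List.range m).foldl
        (fun (st : List Int × Int × Int × Int) i =>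
          (List.range b.length).foldl (pvStepB b st.1 (a.getD i ' ') i) (List.replicate b.length 0, st.2))
        (List.replicate b.length 0, (0, 0, 0))).1 m ∧
      ((List.range m).foldl
        (fun (st : List Int × Int × Int × Int) i =>
          (List.range b.length).foldl (pvStepB b st.1 (a.getD i ' ') i) (List.replicate b.length 0, st.2))
        (List.replicate b.length 0, (0, 0, 0))).2 =
        (pvCells a b m).foldl (pvBStep a b) (0, 0, 0) := by
    intro m
    induction m with
    | zero =>
        refine ⟨⟨by simp, ?_⟩, by simp [pvCells]⟩
        intro j hj; simp [pvSuf]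
    | succ n ih =>
        obtain ⟨ihp, ihb⟩ := ih
        rw [List.range_succ, List.foldl_append, List.foldl_cons, List.foldl_nil]
        set st := (List.range n).foldl
          (fun (st : List Int × Int × Int × Int) i =>
            (List.range b.length).foldl (pvStepB b st.1 (a.getD i ' ') i) (List.replicate b.length 0, st.2))
          (List.replicate b.length 0, (0, 0, 0)) with hst
        obtain ⟨hl, hv, hb⟩ := pvRowB_fold a b st.1 n ihp b.length (le_refl _) st.2
        refine ⟨⟨hl, ?_⟩, ?_⟩
        · intro j hj
          rw [hv j hj, if_pos hj]
        · rw [hb, ihb, pvCells_succ, List.foldl_append, pvRowCells_full]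
  unfold pvFLMB pvCBest
  exact (main a.length).2


-- ===== A side: enumerate, b2j, dict invariants =====

theorem pvEnum_eq (a : List Char) :
    ∀ s : Int, PySem.List.enumerate a s =
      (List.range a.length).map (fun i : Nat => ((s + (i : Int) : Int), a.getD i ' ')) := by
  induction a with
  | nil => intro s; simp [PySem.List.enumerate_nil]
  | cons x xs ih =>
      intro s
      rw [PySem.List.enumerate_cons, ih (s + 1)]
      simp only [List.length_cons, List.range_succ_eq_map, List.map_cons, List.map_map]
      refine congrArg₂ List.cons (by simp) ?_
      apply List.map_congr_left
      intro i _
      simp only [Function.comp_apply, List.getD_cons_succ, Prod.mk.injEq]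
      exact ⟨by push_cast; ring, trivial⟩

theorem pvB2j_getD (b : List Char) (c : Char) :
    (pvB2j b).getD c [] =
      ((List.range b.length).filter (fun j => b.getD j ' ' = c)).map (Nat.cast : Nat → Int) := by
  unfold pvB2j
  rw [pvEnum_eq, List.foldl_map]
  have h := PySem.Dict.getD_foldl_modify_append
    (l := (List.range b.length).map (fun j => (b.getD j ' ', (j : Int))))
    (d := PySem.Dict.empty) (c := c)
  rw [List.foldl_map] at h
  simp only [zero_add] at *
  rw [h]
  simp only [PySem.Dict.getD_empty, List.nil_append, List.filter_map, List.map_map]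
  have e1 : ((fun (p : Char × Int) => p.1 == c) ∘ fun (j : Nat) => (b.getD j ' ', (j : Int))) =
      fun j => b.getD j ' ' == c := by
    funext j; rfl
  rw [e1]
  have e2 : (List.range b.length).filter (fun j => b.getD j ' ' == c) =
      (List.range b.length).filter (fun j => decide (b.getD j ' ' = c)) := by
    apply List.filter_congr
    intro x _
    exact beq_eq_decide _ _
  rw [e2]
  apply List.map_congr_left
  intro x _
  rfl

def pvDictOK (a b : List Char) (d : PySem.Dict Int Int) (i : Nat) : Prop :=
  ∀ z : Int, d.getD z 0 = if 0 ≤ z ∧ z < (b.length : Int) then (pvSuf a b i (z.toNat + 1) : Int) else 0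

theorem pvInsFold_getD_nat (v : Nat → Int) :
    ∀ (ms : List Nat) (d : PySem.Dict Int Int) (j : Nat),
      (ms.foldl (fun d j => d.insert (j : Int) (v j)) d).getD (j : Int) 0 =
        if j ∈ ms then v j else d.getD (j : Int) 0 := by
  intro ms
  induction ms with
  | nil => intro d j; simp
  | cons m rest ih =>
      intro d j
      rw [List.foldl_cons, ih]
      by_cases hjr : j ∈ rest
      · simp [hjr]
      · rw [if_neg hjr, PySem.Dict.getD_insert]
        by_cases hjm : j = m
        · subst hjm; simp
        · rw [if_neg (by exact_mod_cast hjm), if_neg (by simp [hjm, hjr])]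

theorem pvInsFold_getD_low (v : Nat → Int) :
    ∀ (ms : List Nat) (d : PySem.Dict Int Int) (z : Int), z < 0 →
      (ms.foldl (fun d j => d.insert (j : Int) (v j)) d).getD z 0 = d.getD z 0 := by
  intro ms
  induction ms with
  | nil => intro d z _; rfl
  | cons m rest ih =>
      intro d z hz
      rw [List.foldl_cons, ih _ _ hz, PySem.Dict.getD_insert_of_ne]
      intro h
      rw [h] at hz
      omega

theorem pvInnerA_eq (a b : List Char) (i : Nat) (j2len : PySem.Dict Int Int)
    (hd : pvDictOK a b j2len i) :
    ∀ ms : List Nat, (∀ j ∈ ms, j < b.length ∧ b.getD j ' ' = a.getD i ' ') →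
      ∀ (new : PySem.Dict Int Int) (best : Int × Int × Int),
        pvInnerA (i : Int) b.length j2len (ms.map (Nat.cast : Nat → Int)) new best =
          (ms.foldl (fun (d : PySem.Dict Int Int) (j : Nat) => d.insert (j : Int) ((pvSuf a b (i + 1) (j + 1) : Nat) : Int)) new,
           (ms.map (fun j => (i, j))).foldl (pvBStep a b) best) := by
  intro ms
  induction ms with
  | nil => intro _ new best; simp [pvInnerA]
  | cons j js ih =>
      intro hmem new best
      obtain ⟨hjlb, hjc⟩ := hmem j (by simp)
      rw [List.map_cons]
      simp only [pvInnerA]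
      rw [if_neg (by omega), if_neg (by omega)]
      have hk : j2len.getD ((j : Int) - 1) 0 + 1 = pvK a b i j := by
        have hs : pvSuf a b (i + 1) (j + 1) = pvSuf a b i j + 1 := by
          simp only [pvSuf]
          rw [if_pos hjc.symm]
        cases j with
        | zero =>
            rw [hd]
            norm_num [pvK, hs, pvSuf_zero_right]
        | succ m =>
            rw [hd]
            rw [if_pos (by push_cast; omega)]
            have h1 : ((m + 1 : Nat) : Int) - 1 = (m : Int) := by push_cast; ring
            rw [h1]
            simp only [Int.toNat_natCast, pvK, hs]
            push_cast
            ring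
      simp only [hk]
      have hbest : (if best.2.2 < pvK a b i j then
            ((i : Int) - pvK a b i j + 1, (j : Int) - pvK a b i j + 1, pvK a b i j) else best) =
          pvBStep a b best (i, j) := rfl
      rw [hbest, ih (fun x hx => hmem x (by simp [hx])) (new.insert (j : Int) (pvK a b i j)) _]
      simp [pvK]

theorem pvDictOK_next (a b : List Char) (i : Nat) :
    pvDictOK a b
      (((List.range b.length).filter (fun j => b.getD j ' ' = a.getD i ' ')).foldl
        (fun (d : PySem.Dict Int Int) (j : Nat) => d.insert (j : Int) ((pvSuf a b (i + 1) (j + 1) : Nat) : Int)) PySem.Dict.empty)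
      (i + 1) := by
  intro z
  set ms := (List.range b.length).filter (fun j => b.getD j ' ' = a.getD i ' ') with hms
  rcases lt_or_ge z 0 with hz | hz
  · rw [pvInsFold_getD_low _ _ _ _ hz, if_neg (by omega)]
    rfl
  · obtain ⟨n, rfl⟩ : ∃ n : Nat, z = (n : Int) := ⟨z.toNat, by omega⟩
    rw [pvInsFold_getD_nat]
    by_cases hn : n < b.length
    · by_cases hc : b.getD n ' ' = a.getD i ' '
      · have hm : n ∈ ms := by
          rw [hms]
          simp only [List.mem_filter, List.mem_range, decide_eq_true_eq]
          exact ⟨hn, hc⟩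
        rw [if_pos hm, if_pos (by omega)]
        simp
      · have hm : n ∉ ms := by
          rw [hms]
          simp only [List.mem_filter, List.mem_range, decide_eq_true_eq]
          rintro ⟨-, h2⟩
          exact hc h2
        have h0 : pvSuf a b (i + 1) (n + 1) = 0 := by
          simp only [pvSuf]
          rw [if_neg (fun h => hc h.symm)]
        rw [if_neg hm, if_pos (by omega)]
        simp [h0, PySem.Dict.getD_empty]
    · have hm : n ∉ ms := by
        rw [hms]
        simp only [List.mem_filter, List.mem_range, decide_eq_true_eq]
        rintro ⟨h1, -⟩
        exact hn h1
      rw [if_neg hm, if_neg (by omega)]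
      rfl

theorem pvOuterA (a b : List Char) :
    ∀ m : Nat,
      pvDictOK a b ((List.range m).foldl
        (fun (st : PySem.Dict Int Int × (Int × Int × Int)) (i : Nat) =>
          pvInnerA (i : Int) b.length st.1 ((pvB2j b).getD (a.getD i ' ') []) PySem.Dict.empty st.2)
        (PySem.Dict.empty, (0, 0, 0))).1 m ∧
      ((List.range m).foldl
        (fun (st : PySem.Dict Int Int × (Int × Int × Int)) (i : Nat) =>
          pvInnerA (i : Int) b.length st.1 ((pvB2j b).getD (a.getD i ' ') []) PySem.Dict.empty st.2)
        (PySem.Dict.empty, (0, 0, 0))).2 =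
        (pvCells a b m).foldl (pvBStep a b) (0, 0, 0) := by
  intro m
  induction m with
  | zero =>
      constructor
      · intro z
        by_cases h : 0 ≤ z ∧ z < (b.length : Int) <;>
          simp [h, PySem.Dict.getD_empty, pvSuf]
      · simp [pvCells]
  | succ n ih =>
      obtain ⟨ihd, ihb⟩ := ih
      rw [List.range_succ, List.foldl_append, List.foldl_cons, List.foldl_nil]
      set st := (List.range n).foldl
        (fun (st : PySem.Dict Int Int × (Int × Int × Int)) (i : Nat) =>
          pvInnerA (i : Int) b.length st.1 ((pvB2j b).getD (a.getD i ' ') []) PySem.Dict.empty st.2)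
        (PySem.Dict.empty, (0, 0, 0)) with hst
      rw [pvB2j_getD]
      rw [pvInnerA_eq a b n st.1 ihd _
        (fun j hj => ⟨List.mem_range.mp (List.mem_filter.mp hj).1,
                      by have := (List.mem_filter.mp hj).2; simpa using this⟩)
        PySem.Dict.empty st.2]
      constructor
      · exact pvDictOK_next a b n
      · rw [ihb, pvCells_succ, List.foldl_append]
        rfl


-- ===== properties of the canonical best fold; the extension loops are no-ops =====

def pvGood (a b : List Char) (best : Int × Int × Int) : Prop :=
  best = (0, 0, 0) ∨ ∃ i j : Nat, i < a.length ∧ j < b.length ∧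
    b.getD j ' ' = a.getD i ' ' ∧ 0 < pvSuf a b (i + 1) (j + 1) ∧
    best = ((i : Int) - pvK a b i j + 1, (j : Int) - pvK a b i j + 1, pvK a b i j)

theorem pvBStep_bs_le (a b : List Char) (best : Int × Int × Int) (c : Nat × Nat) :
    best.2.2 ≤ (pvBStep a b best c).2.2 := by
  rw [pvBStep]
  split
  · next h => exact le_of_lt h
  · exact le_refl _

theorem pvFold_bs_le (a b : List Char) :
    ∀ (l : List (Nat × Nat)) (best : Int × Int × Int),
      best.2.2 ≤ (l.foldl (pvBStep a b) best).2.2 := by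
  intro l
  induction l with
  | nil => intro best; simp
  | cons c cs ih =>
      intro best
      exact le_trans (pvBStep_bs_le a b best c) (ih _)

theorem pvFold_cell_le (a b : List Char) :
    ∀ (l : List (Nat × Nat)) (best : Int × Int × Int) (c : Nat × Nat), c ∈ l →
      pvK a b c.1 c.2 ≤ (l.foldl (pvBStep a b) best).2.2 := by
  intro l
  induction l with
  | nil => intro _ _ h; simp at h
  | cons d cs ih =>
      intro best c hc
      rcases List.mem_cons.mp hc with h | h
      · subst h
        refine le_trans ?_ (pvFold_bs_le a b cs _)
        rw [pvBStep]
        split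
        · exact le_refl _
        · next h => omega
      · exact ih _ _ h

theorem pvFold_good (a b : List Char) :
    ∀ (l : List (Nat × Nat)) (best : Int × Int × Int),
      (∀ c ∈ l, c.1 < a.length ∧ c.2 < b.length ∧ b.getD c.2 ' ' = a.getD c.1 ' ') →
      pvGood a b best → pvGood a b (l.foldl (pvBStep a b) best) := by
  intro l
  induction l with
  | nil => intro best _ hg; exact hg
  | cons c cs ih =>
      intro best hl hg
      refine ih _ (fun d hd => hl d (by simp [hd])) ?_
      obtain ⟨h1, h2, h3⟩ := hl c (by simp)
      rw [pvBStep]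
      split
      · right
        refine ⟨c.1, c.2, h1, h2, h3, ?_, rfl⟩
        have hbs : 0 ≤ best.2.2 := by
          rcases hg with h | ⟨i, j, _, _, _, _, hb⟩
          · rw [h]
          · rw [hb]
            simp only [pvK]
            positivity
        have : best.2.2 < pvK a b c.1 c.2 := by assumption
        simp only [pvK] at this ⊢
        omega
      · exact hg

theorem pvCells_mem (a b : List Char) (c : Nat × Nat) :
    c ∈ pvCells a b a.length ↔
      c.1 < a.length ∧ c.2 < b.length ∧ b.getD c.2 ' ' = a.getD c.1 ' ' := by
  obtain ⟨i, j⟩ := c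
  simp only [pvCells, pvCellsRow, List.mem_flatMap, List.mem_map, List.mem_filter,
    List.mem_range, decide_eq_true_eq]
  constructor
  · rintro ⟨i', hi', j', ⟨hj', hcc⟩, heq⟩
    injection heq with e1 e2
    subst e1; subst e2
    exact ⟨hi', hj', hcc⟩
  · rintro ⟨h1, h2, h3⟩
    exact ⟨i, h1, j, ⟨h2, h3⟩, rfl⟩

theorem pvCBest_good (a b : List Char) : pvGood a b (pvCBest a b) := by
  apply pvFold_good
  · intro c hc; exact (pvCells_mem a b c).mp hc
  · left; rfl

theorem pvCBest_ge (a b : List Char) (i j : Nat) (hi : i < a.length) (hj : j < b.length)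
    (hc : b.getD j ' ' = a.getD i ' ') : pvK a b i j ≤ (pvCBest a b).2.2 := by
  unfold pvCBest
  exact pvFold_cell_le a b _ _ (i, j) ((pvCells_mem a b (i, j)).mpr ⟨hi, hj, hc⟩)

theorem pvGetD_eq_of_pyGet? (a b : List Char) (n m : Nat) (hn : n < a.length) (hm : m < b.length)
    (h : PySem.List.pyGet? a ((n : Nat) : Int) = PySem.List.pyGet? b ((m : Nat) : Int)) :
    a.getD n ' ' = b.getD m ' ' := by
  rw [PySem.List.pyGet?_natCast, PySem.List.pyGet?_natCast] at h
  rw [List.getElem?_eq_getElem hn, List.getElem?_eq_getElem hm] at h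
  simp only [List.getD, List.getElem?_eq_getElem hn, List.getElem?_eq_getElem hm]
  simpa using h

theorem pvExtBack_noop (a b : List Char) (bi bj bs : Int)
    (h : ¬(0 < bi ∧ 0 < bj ∧ PySem.List.pyGet? a (bi - 1) = PySem.List.pyGet? b (bj - 1))) :
    pvExtBack a b bi bj bs = (bi, bj, bs) := by
  rw [pvExtBack, dif_neg h]

theorem pvExtFwd_noop (a b : List Char) (la lb : Int) (fuel : Nat) (bi bj bs : Int)
    (h : ¬(bi + bs < la ∧ bj + bs < lb ∧
           PySem.List.pyGet? a (bi + bs) = PySem.List.pyGet? b (bj + bs))) :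
    pvExtFwd a b la lb fuel bi bj bs = (bi, bj, bs) := by
  cases fuel with
  | zero => rfl
  | succ n => rw [pvExtFwd, if_neg h]

theorem pvCBest_back_cond (a b : List Char) :
    ¬(0 < (pvCBest a b).1 ∧ 0 < (pvCBest a b).2.1 ∧
      PySem.List.pyGet? a ((pvCBest a b).1 - 1) = PySem.List.pyGet? b ((pvCBest a b).2.1 - 1)) := by
  rintro ⟨h1, h2, h3⟩
  rcases pvCBest_good a b with h0 | ⟨i, j, hi, hj, hc, hs, hb⟩
  · rw [h0] at h1; exact absurd h1 (by norm_num)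
  · rw [hb] at h1 h2 h3
    simp only [pvK] at h1 h2 h3
    set s := pvSuf a b (i + 1) (j + 1) with hsdef
    have hsi : s ≤ i := by omega
    have hsj : s ≤ j := by omega
    have e1 : (i : Int) - (s : Int) + 1 - 1 = ((i - s : Nat) : Int) := by omega
    have e2 : (j : Int) - (s : Int) + 1 - 1 = ((j - s : Nat) : Int) := by omega
    rw [e1, e2] at h3
    have hchars := pvGetD_eq_of_pyGet? a b (i - s) (j - s) (by omega) (by omega) h3
    have hex := pvSuf_exact a b (i + 1) (j + 1) (by omega) (by omega)
    rw [← hsdef] at hex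
    have e3 : i + 1 - s - 1 = i - s := by omega
    have e4 : j + 1 - s - 1 = j - s := by omega
    rw [e3, e4] at hex
    exact hex hchars

theorem pvCBest_fwd_cond (a b : List Char) :
    ¬((pvCBest a b).1 + (pvCBest a b).2.2 < (a.length : Int) ∧
      (pvCBest a b).2.1 + (pvCBest a b).2.2 < (b.length : Int) ∧
      PySem.List.pyGet? a ((pvCBest a b).1 + (pvCBest a b).2.2) =
        PySem.List.pyGet? b ((pvCBest a b).2.1 + (pvCBest a b).2.2)) := by
  rintro ⟨h1, h2, h3⟩
  rcases pvCBest_good a b with h0 | ⟨i, j, hi, hj, hc, hs, hb⟩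
  · rw [h0] at h1 h2 h3
    simp only [add_zero] at h1 h2 h3
    have hla : 0 < a.length := by exact_mod_cast h1
    have hlb : 0 < b.length := by exact_mod_cast h2
    have hchars := pvGetD_eq_of_pyGet? a b 0 0 hla hlb (by exact_mod_cast h3)
    have hk1 : pvK a b 0 0 = 1 := by
      simp only [pvK, pvSuf]
      rw [if_pos hchars]
      norm_num
    have := pvCBest_ge a b 0 0 hla hlb hchars.symm
    rw [hk1, h0] at this
    norm_num at this
  · rw [hb] at h1 h2 h3
    simp only [pvK] at h1 h2 h3
    set s := pvSuf a b (i + 1) (j + 1) with hsdef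
    have e1 : (i : Int) - (s : Int) + 1 + (s : Int) = ((i + 1 : Nat) : Int) := by push_cast; ring
    have e2 : (j : Int) - (s : Int) + 1 + (s : Int) = ((j + 1 : Nat) : Int) := by push_cast; ring
    rw [e1] at h1 h3
    rw [e2] at h2 h3
    have hi1 : i + 1 < a.length := by exact_mod_cast h1
    have hj1 : j + 1 < b.length := by exact_mod_cast h2
    have hchars := pvGetD_eq_of_pyGet? a b (i + 1) (j + 1) hi1 hj1 h3
    have hk1 : pvK a b (i + 1) (j + 1) = (s : Int) + 1 := by
      have hss : s = pvSuf a b i j + 1 := by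
        rw [hsdef]
        simp only [pvSuf]
        rw [if_pos hc.symm]
      simp only [pvK, pvSuf]
      rw [if_pos hchars, if_pos hc.symm, hss]
      push_cast
      ring
    have hge := pvCBest_ge a b (i + 1) (j + 1) hi1 hj1 hchars.symm
    rw [hk1, hb] at hge
    simp only [pvK, ← hsdef] at hge
    omega

theorem pvFLMA_eq_cbest (a b : List Char) : pvFLMA a b = pvCBest a b := by
  have hfold := pvOuterA a b a.length
  simp only [pvFLMA]
  rw [pvEnum_eq, List.foldl_map]
  simp only [zero_add]
  rw [hfold.2]
  have hcb : (pvCells a b a.length).foldl (pvBStep a b) (0, 0, 0) = pvCBest a b := rfl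
  rw [hcb]
  rw [pvExtBack_noop a b _ _ _ (pvCBest_back_cond a b)]
  exact pvExtFwd_noop a b _ _ _ _ _ _ (pvCBest_fwd_cond a b)

theorem pvFLM_eq (a b : List Char) : pvFLMA a b = pvFLMB a b := by
  rw [pvFLMA_eq_cbest, pvFLMB_eq_cbest]

theorem pvGo_eq (fuel : Nat) (start : Int) (ref var : String) :
    pvGoA fuel start ref var = pvGoB fuel start ref var := by
  induction fuel generalizing start ref var with
  | zero => rfl
  | succ n ih =>
      simp only [pvGoA, pvGoB, pvFLM_eq]
      split <;> simp [ih]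

-- ===== VERDICT (by name: the statement is the Claim_ definition above) =====
theorem remove_matching_string_spec : Claim_equal_remove_matching_string := by
  intro start ref var _
  unfold Spec_remove_matching_string remove_matching_string remove_matching_string_alt
  exact pvGo_eq _ _ _ _
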